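-- pv_equiv track=rewrite | github.com/GaragaKarthikeya/openENV | graders/common.py | count_repeated_commands
-- ===== SOURCE A (Python) =====
-- from collections.abc import Mapping, Sequence
--
-- def count_repeated_commands(commands: Sequence[str]) -> int:
--     seen = set()
--     repeated = 0
--     for command in commands:
--         normalized = " ".join(command.lower().split())
--         if normalized in seen:
--             repeated += 1
--         else:
--             seen.add(normalized)
--     return repeated
-- ===== SOURCE B (Python) =====
-- def count_repeated_commands(commands):
--     normalized = sorted(" ".join(command.lower().split()) for command in commands)
--     return sum(1 for x, y in zip(normalized, normalized[1:]) if x == y)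
-- ===== Notes on version B (the rewrite author's own statement) =====
-- stated objective: alternative
-- what changed: Replaces the hash-set membership loop with a sort-then-scan: sort the normalized commands and count adjacent equal pairs (each duplicate group of size k contributes k-1 pairs), using no set at all.
import Mathlib
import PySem

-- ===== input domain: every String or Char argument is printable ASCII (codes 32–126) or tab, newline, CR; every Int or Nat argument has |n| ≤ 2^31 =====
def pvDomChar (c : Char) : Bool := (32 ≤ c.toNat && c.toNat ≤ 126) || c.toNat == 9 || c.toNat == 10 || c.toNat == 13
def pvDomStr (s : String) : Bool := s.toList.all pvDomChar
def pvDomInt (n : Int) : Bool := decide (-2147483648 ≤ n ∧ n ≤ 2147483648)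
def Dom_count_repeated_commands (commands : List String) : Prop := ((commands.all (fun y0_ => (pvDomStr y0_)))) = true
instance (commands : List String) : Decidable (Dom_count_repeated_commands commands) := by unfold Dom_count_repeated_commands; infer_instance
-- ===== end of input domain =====

-- B replaces A's hash-set membership loop by sort-then-scan (count adjacent equal pairs among the sorted normalized commands); same return value, no speed claim.

-- normalized = " ".join(command.lower().split())
def pvNorm (command : String) : String :=
  PySem.Str.join " " (PySem.Str.split₀ (PySem.Str.lower command))

-- ===== PORT A =====
def count_repeated_commands (commands : List String) : Int :=
  (commands.foldl
    (fun (st : PySem.Set String × Int) command =>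
      let normalized := pvNorm command
      if PySem.Set.contains st.1 normalized then (st.1, st.2 + 1)
      else (PySem.Set.add st.1 normalized, st.2))
    (PySem.Set.empty, 0)).2

-- ===== PORT B =====
-- sorted(...) → PySem.List.sorted; zip(normalized, normalized[1:]) → List.zip with drop 1
-- (normalized[1:] on a list is List.drop 1, exact for this nonnegative index);
-- the generator sum is a foldl accumulating +1 on equal pairs.
def count_repeated_commands_alt (commands : List String) : Int :=
  let normalized := PySem.List.sorted (commands.map pvNorm) (fun x => x) false
  (normalized.zip (normalized.drop 1)).foldl
    (fun (acc : Int) p => if p.1 = p.2 then acc + 1 else acc) 0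

-- ===== PRECONDITION & SPEC =====
def Spec_count_repeated_commands (commands : List String) (out : Int) : Prop := out = count_repeated_commands_alt commands
instance (commands : List String) (out : Int) : Decidable (Spec_count_repeated_commands commands out) := by unfold Spec_count_repeated_commands; infer_instance

-- ===== CLAIM =====
def Claim_equal_count_repeated_commands : Prop := ∀ (commands : List String), Dom_count_repeated_commands commands → Spec_count_repeated_commands commands (count_repeated_commands commands)

-- ===== LEMMAS AND PROOFS =====

-- recursive characterisation of the adjacent-equal-pair count
def pvAdj : List String → Int
  | [] => 0
  | [_] => 0
  | x :: y :: t => (if x = y then 1 else 0) + pvAdj (y :: t)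

theorem pv_zip_foldl (s : List String) (acc : Int) :
    (s.zip (s.drop 1)).foldl (fun (acc : Int) p => if p.1 = p.2 then acc + 1 else acc) acc
      = acc + pvAdj s := by
  induction s generalizing acc with
  | nil => simp [pvAdj]
  | cons x s ih =>
    cases s with
    | nil => simp [pvAdj]
    | cons y t =>
      simp only [show List.drop 1 (y :: t) = t from rfl] at ih
      simp only [List.drop_succ_cons, List.drop_zero, List.zip_cons_cons, List.foldl_cons]
      rw [ih]
      by_cases h : x = y
      · simp [pvAdj, h]; ring
      · simp [pvAdj, h]

-- on a ≤-sorted list the adjacent-equal count is length minus number of distinct elements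
theorem pv_adj_sorted (s : List String) (hs : s.Pairwise (· ≤ ·)) :
    pvAdj s = (s.length : Int) - s.toFinset.card := by
  induction s with
  | nil => simp [pvAdj]
  | cons x s ih =>
    cases s with
    | nil => simp [pvAdj]
    | cons y t =>
      have hs' : (y :: t).Pairwise (· ≤ ·) := hs.of_cons
      have hxy : x ≤ y := (List.pairwise_cons.mp hs).1 y (by simp)
      by_cases h : x = y
      · have hmem : x ∈ (y :: t).toFinset := by simp [h]
        have : insert x (y :: t).toFinset = (y :: t).toFinset := Finset.insert_eq_self.mpr hmem
        simp only [pvAdj, if_pos h, List.length_cons]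
        rw [ih hs', show (x :: y :: t).toFinset = (y :: t).toFinset by
          simp only [List.toFinset_cons (a := x)]; exact this]
        simp only [List.length_cons]; push_cast; ring
      · have hnot : x ∉ (y :: t).toFinset := by
          simp only [List.mem_toFinset, List.mem_cons]
          rintro (rfl | hx)
          · exact h rfl
          · have hyx : y ≤ x := (List.pairwise_cons.mp hs').1 x hx
            exact h (le_antisymm hxy hyx)
        simp only [pvAdj, if_neg h, List.length_cons]
        rw [show (x :: y :: t).toFinset = insert x (y :: t).toFinset from List.toFinset_cons,
          Finset.card_insert_of_notMem hnot, ih hs']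
        simp only [List.length_cons]; push_cast; ring

-- A's loop invariant: result counts length minus newly-seen distinct elements
theorem pv_loop_inv (cs : List String) (seen : PySem.Set String) (r : Int) :
    (cs.foldl
      (fun (st : PySem.Set String × Int) command =>
        let normalized := pvNorm command
        if PySem.Set.contains st.1 normalized then (st.1, st.2 + 1)
        else (PySem.Set.add st.1 normalized, st.2))
      (seen, r)).2
    = r + (cs.length : Int)
        - (((PySem.Set.update seen (cs.map pvNorm)).length : Int) - (seen.length : Int)) := by
  induction cs generalizing seen r with
  | nil => simp [PySem.Set.update]
  | cons c cs ih =>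
    simp only [List.foldl_cons, List.map_cons, List.length_cons]
    by_cases h : PySem.Set.contains seen (pvNorm c)
    · have hadd : PySem.Set.add seen (pvNorm c) = seen := by
        simp only [PySem.Set.add, h, if_pos]
      simp only [h, if_pos, PySem.Set.update, List.foldl_cons, hadd]
      rw [ih]
      simp only [PySem.Set.update]
      push_cast
      ring
    · simp only [h, if_neg, Bool.false_eq_true, not_false_iff,
        PySem.Set.update, List.foldl_cons]
      have hadd : PySem.Set.add seen (pvNorm c) = seen ++ [pvNorm c] := by
        unfold PySem.Set.add; rw [if_neg h]
      rw [ih]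
      simp only [PySem.Set.update] at *
      rw [hadd]
      simp only [List.length_append, List.length_cons, List.length_nil]
      push_cast
      ring

-- a duplicate-free list's length is its card of distinct elements
theorem pv_ofList_len (l : List String) :
    ((PySem.Set.ofList l).length : Int) = l.toFinset.card := by
  have hnd : (PySem.Set.ofList l).Nodup := PySem.Set.nodup_ofList l
  have hfs : (PySem.Set.ofList l).toFinset = l.toFinset := by
    apply Finset.ext
    intro a
    simp [List.mem_toFinset, PySem.Set.mem_ofList]
  rw [← hfs, ← List.toFinset_card_of_nodup hnd]

-- ===== VERDICT =====
theorem count_repeated_commands_spec : Claim_equal_count_repeated_commands := by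
  intro commands _
  unfold Spec_count_repeated_commands count_repeated_commands count_repeated_commands_alt
  rw [pv_loop_inv, pv_zip_foldl]
  have hperm := PySem.List.sorted_perm (commands.map pvNorm) (fun x => x) false
  rw [pv_adj_sorted _ (by simpa using PySem.List.sorted_pairwise (commands.map pvNorm) (fun x => x))]
  rw [hperm.length_eq, List.toFinset_eq_of_perm _ _ hperm]
  rw [show PySem.Set.update PySem.Set.empty (commands.map pvNorm)
        = PySem.Set.ofList (commands.map pvNorm) from rfl]
  rw [pv_ofList_len]
  simp only [PySem.Set.empty, List.length_nil, List.length_map]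
  push_cast; ring
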